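-- pv_equiv track=rewrite | github.com/frankier/finn-sense-clust | link.py | filter_grouping_repeats
-- ===== SOURCE A (Python) =====
-- def filter_grouping_repeats(grouping):
--     seen_synsets = set()
--     filtered_synsets = set()
--     for group_num, synsets in grouping.items():
--         for synset in synsets:
--             if synset in seen_synsets:
--                 filtered_synsets.add(synset)
--             seen_synsets.add(synset)
--     for synsets in grouping.values():
--         for filtered_synset in filtered_synsets:
--             if filtered_synset in synsets:
--                 synsets.remove(filtered_synset)
--     return grouping
-- ===== SOURCE B (Python) =====
-- def filter_grouping_repeats(grouping):
--     # sort-then-scan: one sorted pass over all occurrences finds the globally-unique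
--     # synsets; each group then keeps exactly those (in place)
--     occ = sorted(s for synsets in grouping.values() for s in synsets)
--     uniq = []
--     cur = ""
--     cnt = 0
--     for x in occ:
--         if cnt and x == cur:
--             cnt += 1
--         else:
--             if cnt == 1:
--                 uniq.append(cur)
--             cur = x
--             cnt = 1
--     if cnt == 1:
--         uniq.append(cur)
--     unique_set = set(uniq)
--     for synsets in grouping.values():
--         synsets.intersection_update(unique_set)
--     return grouping
-- ===== Notes on version B (the rewrite author's own statement) =====
-- stated objective: alternative
-- what changed: Replaces A's incremental two-set duplicate detection plus per-group iteration over the duplicate set (one membership test and one remove per duplicate per group) by sort-then-scan: flatten and sort all occurrences, extract the globally-unique synsets in a single run-length pass over the sorted list, then one set intersection per group; Pre_ requires each group's element list to be duplicate-free, since in A's callers the groups are Python sets -- on list-valued corner inputs with an in-group duplicate A still returns (it removes only the first copy) while B, written for sets, raises.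
-- outside the precondition, e.g. on filter_grouping_repeats({1: ['a', 'a']}): A returns {1: ['a']}, B raises AttributeError
import Mathlib
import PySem

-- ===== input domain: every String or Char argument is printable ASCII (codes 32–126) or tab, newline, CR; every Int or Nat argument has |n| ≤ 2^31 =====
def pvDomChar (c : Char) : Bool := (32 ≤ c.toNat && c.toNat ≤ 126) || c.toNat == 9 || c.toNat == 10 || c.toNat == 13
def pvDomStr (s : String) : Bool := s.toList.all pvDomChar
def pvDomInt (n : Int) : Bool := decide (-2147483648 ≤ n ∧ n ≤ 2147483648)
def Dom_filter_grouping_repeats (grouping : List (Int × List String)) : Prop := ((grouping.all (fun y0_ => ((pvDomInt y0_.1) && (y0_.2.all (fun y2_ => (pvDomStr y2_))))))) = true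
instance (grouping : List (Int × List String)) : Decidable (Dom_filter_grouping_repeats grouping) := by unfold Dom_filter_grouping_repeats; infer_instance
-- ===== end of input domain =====

-- B replaces A's two-set incremental duplicate detection plus per-group remove-scans by
-- sort-then-scan: sort all occurrences, extract the globally-unique synsets in one
-- run-length pass, then intersect each group with them (objective: alternative).
-- Both Pythons mutate the groups' sets in place and return the same mapping; the
-- theorems are about the return value.

-- ===== PORT A =====
-- A's first-pass loop body: check 'synset in seen' (filtered.add), then seen.add
def pvStepA (st : PySem.Set String × PySem.Set String) (synset : String) :
    PySem.Set String × PySem.Set String :=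
  let filtered := if PySem.Set.contains st.1 synset then PySem.Set.add st.2 synset else st.2
  (PySem.Set.add st.1 synset, filtered)

-- A's second-pass loop body: 'if filtered_synset in synsets: synsets.remove(filtered_synset)'
def pvRemStep (synsets : List String) (d : String) : List String :=
  if synsets.contains d then
    match PySem.List.remove? synsets d with
    | some l => l
    | none => synsets
  else synsets

def filter_grouping_repeats (grouping : List (Int × List String)) : List (Int × List String) :=
  let st := grouping.foldl (fun st g => g.2.foldl pvStepA st)
    (PySem.Set.empty, PySem.Set.empty)
  -- iterating the filtered Set's element list is exact here: first-occurrence removals of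
  -- distinct elements commute, so the result cannot depend on Python's set iteration order
  grouping.map (fun g => (g.1, st.2.foldl pvRemStep g.2))

-- ===== PORT B =====
-- the run-length loop body: 'if cnt and x == cur: cnt += 1 else: (maybe emit cur); cur, cnt = x, 1'
def pvUniqStep (st : String × Int × List String) (x : String) : String × Int × List String :=
  if st.2.1 ≠ 0 ∧ x = st.1 then (st.1, st.2.1 + 1, st.2.2)
  else (x, 1, if st.2.1 = 1 then st.2.2 ++ [st.1] else st.2.2)

-- the run-length pass over the sorted occurrence list, plus the trailing 'if cnt == 1' emit
def pvUniques (occ : List String) : List String :=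
  let st := occ.foldl pvUniqStep ("", 0, ([] : List String))
  if st.2.1 = 1 then st.2.2 ++ [st.1] else st.2.2

def filter_grouping_repeats_alt (grouping : List (Int × List String)) :
    List (Int × List String) :=
  let occ := PySem.List.sorted (grouping.flatMap Prod.snd) (fun s => s) false
  let uniqueSet := PySem.Set.ofList (pvUniques occ)
  -- 'synsets.intersection_update(unique_set)': each group's set keeps its elements in uniqueSet
  grouping.map (fun g => (g.1, PySem.Set.inter g.2 uniqueSet))

-- ===== PRECONDITION & SPEC =====
-- In A's callers every group is a Python set (the declared input type is dict[int, set[str]]),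
-- so each group's element list is duplicate-free; Pre_ states exactly that. On list-valued
-- corner inputs with an in-group duplicate A still returns a value (it removes only the first
-- copy) while B, written for sets, raises; those inputs are excluded.
def Pre_filter_grouping_repeats (grouping : List (Int × List String)) : Prop :=
  ∀ g ∈ grouping, g.2.Nodup
instance (grouping : List (Int × List String)) : Decidable (Pre_filter_grouping_repeats grouping) := by unfold Pre_filter_grouping_repeats; infer_instance

def pvWitness_filter_grouping_repeats : (List (Int × List String)) :=
  [(1, ["a", "b"]), (2, ["a"])]

def Spec_filter_grouping_repeats (grouping : List (Int × List String)) (out : List (Int × List String)) : Prop := out = filter_grouping_repeats_alt grouping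
instance (grouping : List (Int × List String)) (out : List (Int × List String)) : Decidable (Spec_filter_grouping_repeats grouping out) := by unfold Spec_filter_grouping_repeats; infer_instance

-- ===== CLAIM (what is proved, stated in full; the proofs are below) =====
def Claim_equal_filter_grouping_repeats : Prop := ∀ (grouping : List (Int × List String)), Dom_filter_grouping_repeats grouping → Pre_filter_grouping_repeats grouping → Spec_filter_grouping_repeats grouping (filter_grouping_repeats grouping)

-- ===== LEMMAS AND PROOFS =====

-- the common abstraction: skip the first occurrence of each pending element, keep the rest
def pvScan : List String → PySem.Set String → List String
  | [], _ => []
  | x :: xs, p =>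
    if x ∈ p then pvScan xs (PySem.Set.discard p x) else x :: pvScan xs p

-- double fold over the groups = fold over the flattened synset list
theorem foldl_groups {σ : Type} (f : σ → String → σ) :
    ∀ (l : List (Int × List String)) (st : σ),
      l.foldl (fun st g => g.2.foldl f st) st = (l.flatMap Prod.snd).foldl f st := by
  intro l
  induction l with
  | nil => intro st; rfl
  | cons g t ih => intro st; simp [List.foldl_append, ih]

-- membership in the two components of A's first-pass state
theorem memA (s : String) :
    ∀ (flat : List String) (seen filt : PySem.Set String),
      (s ∈ (flat.foldl pvStepA (seen, filt)).1 ↔ s ∈ seen ∨ s ∈ flat) ∧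
      (s ∈ (flat.foldl pvStepA (seen, filt)).2 ↔
        s ∈ filt ∨ (s ∈ seen ∧ s ∈ flat) ∨ 2 ≤ flat.count s) := by
  intro flat
  induction flat with
  | nil => intro seen filt; simp
  | cons x xs ih =>
    intro seen filt
    have hstep : pvStepA (seen, filt) x =
        (PySem.Set.add seen x, if PySem.Set.contains seen x then PySem.Set.add filt x else filt) := rfl
    have hmem_filt' : s ∈ (if PySem.Set.contains seen x then PySem.Set.add filt x else filt) ↔
        s ∈ filt ∨ (x ∈ seen ∧ s = x) := by
      by_cases hc : x ∈ seen
      · rw [if_pos ((PySem.Set.contains_iff seen x).mpr hc)]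
        simp [PySem.Set.mem_add, hc]
      · have hcf : PySem.Set.contains seen x = false := by
          simp [PySem.Set.contains_eq_listContains]; exact hc
        rw [hcf]
        simp only [Bool.false_eq_true, if_false]
        constructor
        · exact Or.inl
        · rintro (h | ⟨h, _⟩)
          · exact h
          · exact absurd h hc
    obtain ⟨ih1, ih2⟩ := ih (PySem.Set.add seen x)
      (if PySem.Set.contains seen x then PySem.Set.add filt x else filt)
    have hcnt : (x :: xs).count s = xs.count s + (if x = s then 1 else 0) := by
      simp [List.count_cons, beq_iff_eq]
    have hmemc : s ∈ xs ↔ 1 ≤ xs.count s := by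
      rw [← List.count_pos_iff]; omega
    constructor
    · rw [List.foldl_cons, hstep, ih1]
      clear ih ih1 ih2
      simp [PySem.Set.mem_add]
      tauto
    · rw [List.foldl_cons, hstep, ih2, hmem_filt', List.mem_cons, hcnt, hmemc]
      simp only [PySem.Set.mem_add]
      clear ih ih1 ih2 hstep hmem_filt'
      by_cases hxs : x = s
      · subst hxs
        rw [if_pos rfl]
        by_cases hA : x ∈ filt <;> by_cases hB : x ∈ seen <;>
          simp [hA, hB] <;> exact fun h => hmemc.mpr (by omega)
      · have hsx : ¬ s = x := fun h => hxs h.symm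
        rw [if_neg hxs]
        by_cases hA : s ∈ filt <;> by_cases hB : s ∈ seen <;>
          simp [hA, hB, hsx]

theorem nodupA :
    ∀ (flat : List String) (seen filt : PySem.Set String),
      seen.Nodup → filt.Nodup → (flat.foldl pvStepA (seen, filt)).2.Nodup := by
  intro flat
  induction flat with
  | nil => intro seen filt _ hf; exact hf
  | cons x xs ih =>
    intro seen filt hs hf
    rw [List.foldl_cons]
    apply ih
    · exact PySem.Set.nodup_add seen x hs
    · by_cases hc : PySem.Set.contains seen x = true
      · show (if PySem.Set.contains seen x then PySem.Set.add filt x else filt).Nodup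
        rw [if_pos hc]; exact PySem.Set.nodup_add filt x hf
      · show (if PySem.Set.contains seen x then PySem.Set.add filt x else filt).Nodup
        rw [if_neg hc]; exact hf

-- the scan depends only on the membership (restricted to the scanned elements) of the pending set
theorem scan_congr :
    ∀ (syns : List String) (p q : PySem.Set String),
      (∀ s ∈ syns, s ∈ p ↔ s ∈ q) → pvScan syns p = pvScan syns q := by
  intro syns
  induction syns with
  | nil => intro p q h; rfl
  | cons x xs ih =>
    intro p q h
    have hx' := h x (List.mem_cons_self ..)
    simp only [pvScan]
    by_cases hx : x ∈ p
    · rw [if_pos hx, if_pos (hx'.mp hx), ih]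
      intro s hs
      simp [PySem.Set.mem_discard, h s (List.mem_cons_of_mem _ hs)]
    · rw [if_neg hx, if_neg (fun hq => hx (hx'.mpr hq)), ih _ _
        (fun s hs => h s (List.mem_cons_of_mem _ hs))]

-- on a duplicate-free list the scan is a plain filter
theorem pvScan_nodup :
    ∀ (syns : List String) (p : PySem.Set String), syns.Nodup →
      pvScan syns p = syns.filter (fun x => !(List.contains p x)) := by
  intro syns
  induction syns with
  | nil => intro p _; rfl
  | cons x xs ih =>
    intro p hnd
    obtain ⟨hxm, hnd'⟩ := List.nodup_cons.mp hnd
    simp only [pvScan, List.filter_cons]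
    by_cases hx : x ∈ p
    · have hc : (!(List.contains p x)) = false := by simp [hx]
      rw [if_pos hx, hc]
      simp only [Bool.false_eq_true, if_false]
      rw [scan_congr xs (PySem.Set.discard p x) p
        (fun s hs => by
          simp only [PySem.Set.mem_discard]
          exact ⟨fun h => h.1, fun h => ⟨h, fun he => hxm (he ▸ hs)⟩⟩)]
      exact ih p hnd'
    · have hc : (!(List.contains p x)) = true := by simp [hx]
      rw [if_neg hx, hc]
      simp only [if_true]
      rw [ih p hnd']

theorem remStep_cons (x d : String) (xs : List String) (hne : d ≠ x) :
    pvRemStep (x :: xs) d = x :: pvRemStep xs d := by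
  by_cases hm : d ∈ xs
  · have h1 : PySem.List.remove? (x :: xs) d = some (x :: xs.erase d) := by
      rw [PySem.List.remove?_cons_of_ne xs (Ne.symm hne),
        PySem.List.remove?_eq_some_erase xs d hm]; rfl
    have h2 : PySem.List.remove? xs d = some (xs.erase d) :=
      PySem.List.remove?_eq_some_erase xs d hm
    simp [pvRemStep, h1, h2, hm]
  · have h2 : PySem.List.remove? xs d = none := (PySem.List.remove?_eq_none_iff xs d).mpr hm
    have hm' : d ∉ x :: xs := by simp [hne, hm]
    simp [pvRemStep, hm, hm']

theorem remStep_head (x : String) (l : List String) : pvRemStep (x :: l) x = l := by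
  simp [pvRemStep]

theorem remFold_nil : ∀ ds : List String, ds.foldl pvRemStep [] = [] := by
  intro ds
  induction ds with
  | nil => rfl
  | cons d t ih => simpa [pvRemStep] using ih

theorem remFold_cons (x : String) :
    ∀ (ds : List String) (xs : List String), x ∉ ds →
      ds.foldl pvRemStep (x :: xs) = x :: ds.foldl pvRemStep xs := by
  intro ds
  induction ds with
  | nil => intro xs _; rfl
  | cons d t ih =>
    intro xs hx
    have hdx : d ≠ x := fun h => hx (h ▸ List.mem_cons_self ..)
    have hxt : x ∉ t := fun h => hx (List.mem_cons_of_mem _ h)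
    simp only [List.foldl_cons, remStep_cons x d xs hdx]
    exact ih _ hxt

-- A's removal fold over a nodup duplicate list equals the scan
theorem remFold_eq_scan :
    ∀ (syns : List String) (ds : List String), ds.Nodup →
      ds.foldl pvRemStep syns = pvScan syns ds := by
  intro syns
  induction syns with
  | nil => intro ds _; simp [pvScan, remFold_nil]
  | cons x xs ih =>
    intro ds hnd
    by_cases hx : x ∈ ds
    · obtain ⟨ds1, ds2, rfl⟩ := List.append_of_mem hx
      have h := hnd
      rw [List.nodup_append] at h
      obtain ⟨h1, h2, hdis⟩ := h
      have hx1 : x ∉ ds1 := fun hm => hdis x hm x (List.mem_cons_self ..) rfl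
      have hx2 : x ∉ ds2 := (List.nodup_cons.mp h2).1
      have hnd' : (ds1 ++ ds2).Nodup :=
        hnd.sublist (List.Sublist.append_left (List.sublist_cons_self x ds2) ds1)
      calc (ds1 ++ x :: ds2).foldl pvRemStep (x :: xs)
          = (x :: ds2).foldl pvRemStep (ds1.foldl pvRemStep (x :: xs)) := by
            rw [List.foldl_append]
        _ = (x :: ds2).foldl pvRemStep (x :: ds1.foldl pvRemStep xs) := by
            rw [remFold_cons x ds1 xs hx1]
        _ = ds2.foldl pvRemStep (ds1.foldl pvRemStep xs) := by
            simp only [List.foldl_cons, remStep_head]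
        _ = (ds1 ++ ds2).foldl pvRemStep xs := by rw [List.foldl_append]
        _ = pvScan xs (ds1 ++ ds2) := ih _ hnd'
        _ = pvScan xs (PySem.Set.discard (ds1 ++ x :: ds2) x) := by
            apply scan_congr
            intro s _
            simp only [PySem.Set.mem_discard, List.mem_append, List.mem_cons]
            constructor
            · rintro (hs | hs)
              · exact ⟨Or.inl hs, fun h => hx1 (h ▸ hs)⟩
              · exact ⟨Or.inr (Or.inr hs), fun h => hx2 (h ▸ hs)⟩
            · rintro ⟨hs | hs | hs, hne⟩
              · exact Or.inl hs
              · exact absurd hs hne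
              · exact Or.inr hs
        _ = pvScan (x :: xs) (ds1 ++ x :: ds2) := by
            simp only [pvScan, if_pos hx]
    · rw [remFold_cons x ds xs hx]
      simp only [pvScan, if_neg hx]
      rw [ih ds hnd]

-- ===== B-side lemmas =====

-- consuming a run of the current element just increments the counter
theorem uniq_run_consume :
    ∀ (k : Nat) (cur : String) (cnt : Int), 1 ≤ cnt → ∀ (u rest : List String),
      (List.replicate k cur ++ rest).foldl pvUniqStep (cur, cnt, u) =
        rest.foldl pvUniqStep (cur, cnt + (k : Int), u) := by
  intro k
  induction k with
  | zero => intro cur cnt _ u rest; simp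
  | succ n ih =>
    intro cur cnt hcnt u rest
    have hstep : pvUniqStep (cur, cnt, u) cur = (cur, cnt + 1, u) := by
      have h : cnt ≠ 0 := by omega
      simp [pvUniqStep, h]
    rw [List.replicate_succ, List.cons_append, List.foldl_cons, hstep,
      ih cur (cnt + 1) (by omega) u rest]
    have h2 : cnt + 1 + (n : Int) = cnt + ((n + 1 : Nat) : Int) := by push_cast; omega
    rw [h2]

-- finishing state of the run-length pass
def pvUniqPost (st : String × Int × List String) : List String :=
  if st.2.1 = 1 then st.2.2 ++ [st.1] else st.2.2

-- in a sorted list, membership of the run-length pass's output = 'count 1' (strong induction)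
theorem uniq_mem (s : String) :
    ∀ (n : Nat) (xs : List String), xs.length ≤ n → ∀ (x : String) (u : List String),
      (x :: xs).Pairwise (· ≤ ·) →
      (s ∈ pvUniqPost (xs.foldl pvUniqStep (x, 1, u)) ↔ s ∈ u ∨ (x :: xs).count s = 1) := by
  intro n
  induction n with
  | zero =>
    intro xs hlen x u _
    have : xs = [] := List.eq_nil_of_length_eq_zero (Nat.le_zero.mp hlen)
    subst this
    simp only [List.foldl_nil, pvUniqPost]
    by_cases hsx : s = x
    · simp [hsx, List.count_cons]
    · have hxs : ¬ x = s := fun h => hsx h.symm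
      simp [hsx, hxs, List.count_cons]
  | succ m ih =>
    intro xs hlen x u hsorted
    -- decompose xs into the leading run of x and the rest
    set run := xs.takeWhile (fun z => z == x) with hrun
    set rest := xs.dropWhile (fun z => z == x) with hrest
    have hsplit : xs = run ++ rest := (List.takeWhile_append_dropWhile).symm
    have hrun_repl : run = List.replicate run.length x := by
      apply List.eq_replicate_of_mem
      intro y hy
      have := List.mem_takeWhile_imp (hrun ▸ hy)
      simpa [beq_iff_eq] using this
    have hle_all : ∀ y ∈ xs, x ≤ y := fun y hy => (List.pairwise_cons.mp hsorted).1 y hy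
    have hrest_sorted : rest.Pairwise (· ≤ ·) := by
      have hxs : xs.Pairwise (· ≤ ·) := (List.pairwise_cons.mp hsorted).2
      have : rest.Sublist xs := hrest ▸ List.dropWhile_sublist _
      exact hxs.sublist this
    have hx_notin_rest : x ∉ rest := by
      intro hmem
      cases hr : rest with
      | nil => rw [hr] at hmem; exact absurd hmem (List.not_mem_nil)
      | cons y r' =>
        have hy_ne : ¬ (y == x) = true := by
          have := List.head?_dropWhile_not (fun z => z == x) xs
          rw [← hrest, hr] at this
          simpa using this
        have hy_ne' : y ≠ x := by simpa [beq_iff_eq] using hy_ne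
        rw [hr] at hmem
        rcases List.mem_cons.mp hmem with h | h
        · exact hy_ne' h.symm
        · -- y ≤ x from rest sorted, x ≤ y from hle_all → y = x, contradiction
          have h1 : y ≤ x := by
            rw [hr] at hrest_sorted
            exact (List.pairwise_cons.mp hrest_sorted).1 x h
          have h2 : x ≤ y := hle_all y (by
            rw [hsplit, hr]; exact List.mem_append_right _ (List.mem_cons_self ..))
          exact hy_ne' (le_antisymm h1 h2)
    have hfold : xs.foldl pvUniqStep (x, 1, u) =
        rest.foldl pvUniqStep (x, 1 + (run.length : Int), u) := by
      conv_lhs => rw [hsplit, hrun_repl]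
      exact uniq_run_consume run.length x 1 (by omega) u rest
    have hcount : ∀ t : String, (x :: xs).count t =
        (if t = x then run.length + 1 else 0) + rest.count t := by
      intro t
      rw [hsplit, hrun_repl]
      by_cases ht : t = x
      · subst ht
        simp [List.count_cons, List.count_append, List.count_replicate]
        omega
      · have hxt : x ≠ t := fun h => ht h.symm
        simp [List.count_cons, List.count_append, List.count_replicate, ht, hxt]
    cases hr : rest with
    | nil =>
      rw [hfold, hr]
      simp only [List.foldl_nil, pvUniqPost]
      have hc : (x :: xs).count s = if s = x then run.length + 1 else 0 := by
        rw [hcount s, hr]; simp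
      by_cases hk : (1 : Int) + (run.length : Int) = 1
      · have hk0 : run.length = 0 := by omega
        rw [if_pos hk]
        simp only [List.mem_append, List.mem_singleton, hc, hk0]
        by_cases hsx : s = x <;> simp [hsx]
      · have hk0 : run.length ≠ 0 := fun h => hk (by simp [h])
        rw [if_neg hk, hc]
        have hrn : run ≠ [] := fun h => hk0 (by simp [h])
        by_cases hsx : s = x <;> simp [hsx, hrn]
    | cons y r' =>
      have hy_ne : y ≠ x := by
        intro h; exact hx_notin_rest (hr ▸ h ▸ List.mem_cons_self ..)
      have hstep : pvUniqStep (x, 1 + (run.length : Int), u) y =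
          (y, 1, if 1 + (run.length : Int) = 1 then u ++ [x] else u) := by
        simp [pvUniqStep, hy_ne]
      have hlen' : r'.length ≤ m := by
        have h1 : rest.length ≤ xs.length := by
          rw [hsplit]; simp
        rw [hr] at h1
        simp at h1
        omega
      have hr_sorted : (y :: r').Pairwise (· ≤ ·) := hr ▸ hrest_sorted
      rw [hfold, hr, List.foldl_cons, hstep]
      rw [ih r' hlen' y _ hr_sorted]
      have hcnt_rest : (x :: xs).count s =
          (if s = x then run.length + 1 else 0) + (y :: r').count s := by
        rw [hcount s, hr]
      constructor
      · rintro (hu | hc)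
        · by_cases hk : 1 + (run.length : Int) = 1
          · rw [if_pos hk] at hu
            rcases List.mem_append.mp hu with h | h
            · exact Or.inl h
            · -- s = x and run.length = 0, and x ∉ rest so count = 1
              have hsx : s = x := by simpa using h
              have hk0 : run.length = 0 := by omega
              right
              rw [hcnt_rest, if_pos hsx, hk0]
              have : (y :: r').count x = 0 := by
                rw [← hr]
                exact List.count_eq_zero.mpr hx_notin_rest
              rw [hsx, this]
          · rw [if_neg hk] at hu
            exact Or.inl hu
        · right
          rw [hcnt_rest]
          have hsx : s ≠ x := by
            intro h
            subst h
            have : (y :: r').count s = 0 := by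
              rw [← hr]; exact List.count_eq_zero.mpr hx_notin_rest
            omega
          rw [if_neg hsx]
          omega
      · rintro (hu | hc)
        · left
          by_cases hk : 1 + (run.length : Int) = 1
          · rw [if_pos hk]; exact List.mem_append_left _ hu
          · rw [if_neg hk]; exact hu
        · by_cases hsx : s = x
          · -- count in rest is 0, so run.length + 1 = 1, i.e. run empty: emitted x
            rw [hcnt_rest, if_pos hsx] at hc
            have hzero : (y :: r').count s = 0 := by
              rw [← hr, hsx]; exact List.count_eq_zero.mpr hx_notin_rest
            rw [hzero] at hc
            have hk0 : run.length = 0 := by omega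
            left
            rw [if_pos (by simp [hk0])]
            exact List.mem_append_right _ (by simp [hsx])
          · right
            rw [hcnt_rest, if_neg hsx] at hc
            omega

-- membership of B's unique list on a sorted input = 'occurs exactly once'
theorem mem_pvUniques (occ : List String) (hs : occ.Pairwise (· ≤ ·)) (s : String) :
    s ∈ pvUniques occ ↔ occ.count s = 1 := by
  cases occ with
  | nil => simp [pvUniques]
  | cons x xs =>
    have hfirst : pvUniqStep ("", 0, ([] : List String)) x = (x, 1, []) := by
      simp [pvUniqStep]
    have : pvUniques (x :: xs) = pvUniqPost (xs.foldl pvUniqStep (x, 1, [])) := by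
      simp only [pvUniques, List.foldl_cons, hfirst, pvUniqPost]
    rw [this, uniq_mem s xs.length xs le_rfl x [] hs]
    simp

-- ===== VERDICT (by name: the statement is the Claim_ definition above) =====
theorem filter_grouping_repeats_spec : Claim_equal_filter_grouping_repeats := by
  intro grouping _ hpre
  unfold Spec_filter_grouping_repeats
  unfold filter_grouping_repeats filter_grouping_repeats_alt
  rw [foldl_groups]
  apply List.map_congr_left
  intro g hg
  refine Prod.ext rfl ?_
  set flat := grouping.flatMap Prod.snd with hflat
  set dupes := ((flat.foldl pvStepA (PySem.Set.empty, PySem.Set.empty)).2 : PySem.Set String)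
    with hdupes
  set occ := PySem.List.sorted flat (fun s => s) false with hocc
  set U := (PySem.Set.ofList (pvUniques occ) : PySem.Set String) with hU
  have hnd : (dupes : List String).Nodup := nodupA _ _ _ List.nodup_nil List.nodup_nil
  have hmemd : ∀ s, s ∈ (dupes : List String) ↔ 2 ≤ flat.count s := by
    intro s
    have := (memA s flat PySem.Set.empty PySem.Set.empty).2
    rw [hdupes, this]
    simp [PySem.Set.empty]
  have hsorted : occ.Pairwise (· ≤ ·) := by
    have := PySem.List.sorted_pairwise flat (fun s => s)
    simpa using this
  have hcnt_occ : ∀ s, occ.count s = flat.count s := fun s =>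
    ((PySem.List.sorted_perm flat (fun s => s) false).count_eq s)
  show (dupes : PySem.Set String).foldl pvRemStep g.2 = PySem.Set.inter g.2 U
  have hinter : PySem.Set.inter g.2 U = g.2.filter (fun x => List.contains U x) := by
    simp [PySem.Set.inter]
  rw [remFold_eq_scan g.2 dupes hnd, pvScan_nodup g.2 dupes (hpre g hg), hinter]
  apply List.filter_congr
  intro x hx
  have hx_flat : x ∈ flat := by
    rw [hflat]
    exact List.mem_flatMap.mpr ⟨g, hg, hx⟩
  have hx_cnt : 1 ≤ flat.count x := List.count_pos_iff.mpr hx_flat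
  have hiff : x ∉ (dupes : List String) ↔ x ∈ (U : List String) := by
    rw [hmemd x, hU, PySem.Set.mem_ofList, mem_pvUniques occ hsorted x, hcnt_occ x]
    omega
  rcases Decidable.em (x ∈ (dupes : List String)) with hd | hd
  · have hu : x ∉ (U : List String) := fun h => (hiff.mpr h) hd
    simp [hd, hu]
  · have hu : x ∈ (U : List String) := hiff.mp hd
    simp [hd, hu]
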